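-- pv_equiv track=rewrite | github.com/megaaa13/LEPL1401 | Section4/bioinfo.py | distances_matrice
-- ===== SOURCE A (Python) =====
-- def distance_h(text1, text2):
--     """pre: text1, text2, strings
--     \npost : retourne la distance de haming des 2 strings"""
--     diff = 0
--     if len(text1) != len(text2):
--         return None
--     for i in range(len(text1)):
--         if text1[i].lower() != text2[i].lower():
--             diff += 1
--     return diff
--
-- def distances_matrice(l):
--     """pre: l: list de string
--     \npost: retourne une matrice des distances de haming pour une liste donnée"""
--     matrix = []
--     for i in l:
--         r = []
--         for j in range(len(l)):
--             r.append(distance_h(i, l[j]))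
--         matrix.append(r.copy())
--     return matrix
-- ===== SOURCE B (Python) =====
-- def distance_h(text1, text2):
--     """pre: text1, text2, strings
--     \npost : retourne la distance de haming des 2 strings"""
--     diff = 0
--     if len(text1) != len(text2):
--         return None
--     for i in range(len(text1)):
--         if text1[i].lower() != text2[i].lower():
--             diff += 1
--     return diff
--
-- def distances_matrice(l):
--     # Compute only the upper triangle: each row mirrors earlier rows' entries
--     # (Hamming distance is symmetric), the diagonal is always 0.
--     rows = []
--     for i, s in enumerate(l):
--         rows.append([r[i] for r in rows] + [0] + [distance_h(s, t) for t in l[i+1:]])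
--     return rows
-- ===== Notes on version B (the rewrite author's own statement) =====
-- stated objective: alternative
-- what changed: B builds each row from previously computed rows (mirroring the symmetric entries), puts a literal 0 on the diagonal, and calls distance_h only on the upper triangle l[i+1:], so each pairwise distance is computed once instead of twice (and never on the diagonal).
import Mathlib
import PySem

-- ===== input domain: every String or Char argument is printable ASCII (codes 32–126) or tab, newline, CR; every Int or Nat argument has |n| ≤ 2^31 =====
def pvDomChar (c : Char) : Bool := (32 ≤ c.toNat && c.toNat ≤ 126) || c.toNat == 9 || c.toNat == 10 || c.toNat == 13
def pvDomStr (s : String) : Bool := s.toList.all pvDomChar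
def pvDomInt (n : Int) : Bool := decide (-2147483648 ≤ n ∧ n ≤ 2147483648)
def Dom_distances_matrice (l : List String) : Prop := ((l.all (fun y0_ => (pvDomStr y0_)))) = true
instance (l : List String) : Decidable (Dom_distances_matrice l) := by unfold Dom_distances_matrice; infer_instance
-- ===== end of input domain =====

-- B computes each Hamming distance once (mirror earlier rows' entries, diagonal literal 0)
-- instead of A's full n×n recomputation; objective: alternative (half the distance_h calls).

-- ===== PORT A =====
-- distance_h: shared helper of A and B (B keeps it verbatim).
-- text[i] is exact via List.getD on toList (i always in range here); the .lower() of a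
-- one-character string is exactly PySem.Chars.lowerChar of that character.
def distance_h (t1 t2 : String) : Option Int :=
  let c1 := t1.toList
  let c2 := t2.toList
  if c1.length ≠ c2.length then none
  else some ((List.range c1.length).foldl
    (fun diff i =>
      if PySem.Chars.lowerChar (c1.getD i ' ') ≠ PySem.Chars.lowerChar (c2.getD i ' ')
      then diff + 1 else diff) 0)

-- l[j] with j from range(len(l)) is exact via List.getD (j always in range)
def distances_matrice (l : List String) : List (List (Option Int)) :=
  l.foldl
    (fun matrix i =>
      matrix ++ [(List.range l.length).foldl (fun r j => r ++ [distance_h i (l.getD j "")]) []])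
    []

-- ===== PORT B =====
-- r[i] (i always in range: every earlier row has full length) via pyGetD; l[i+1:] via slice
def distances_matrice_alt (l : List String) : List (List (Option Int)) :=
  (PySem.List.enumerate l 0).foldl
    (fun rows p =>
      rows ++ [(rows.map (fun r => PySem.List.pyGetD r p.1 none)) ++ [some 0]
               ++ ((PySem.List.slice l (some (p.1 + 1)) none).map (fun t => distance_h p.2 t))])
    []

-- ===== PRECONDITION & SPEC =====
def Spec_distances_matrice (l : List String) (out : List (List (Option Int))) : Prop := out = distances_matrice_alt l
instance (l : List String) (out : List (List (Option Int))) : Decidable (Spec_distances_matrice l out) := by unfold Spec_distances_matrice; infer_instance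

-- ===== CLAIM (what is proved, stated in full; the proofs are below) =====
def Claim_equal_distances_matrice : Prop := ∀ (l : List String), Dom_distances_matrice l → Spec_distances_matrice l (distances_matrice l)

-- ===== LEMMAS AND PROOFS =====

-- the common normal form: the full matrix written entrywise
def entH (l : List String) (i j : Nat) : Option Int := distance_h (l.getD i "") (l.getD j "")
def rowH (l : List String) (i : Nat) : List (Option Int) := (List.range l.length).map (entH l i)
def MH (l : List String) : List (List (Option Int)) := (List.range l.length).map (rowH l)

lemma dh_comm (a b : String) : distance_h a b = distance_h b a := by
  unfold distance_h
  by_cases h : a.toList.length = b.toList.length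
  · rw [if_neg (by simp [h]), if_neg (by simp [h]), h]
    congr 1
    have hf : (fun (diff : Int) (i : Nat) =>
        if PySem.Chars.lowerChar (a.toList.getD i ' ') ≠ PySem.Chars.lowerChar (b.toList.getD i ' ')
        then diff + 1 else diff)
      = (fun (diff : Int) (i : Nat) =>
        if PySem.Chars.lowerChar (b.toList.getD i ' ') ≠ PySem.Chars.lowerChar (a.toList.getD i ' ')
        then diff + 1 else diff) := by
      funext d i
      exact if_congr ne_comm rfl rfl
    rw [hf]
  · rw [if_pos h, if_pos (Ne.symm h)]

lemma dh_self (a : String) : distance_h a a = some 0 := by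
  simp [distance_h]

lemma map_eq_map_range {β : Type} (l : List String) (g : String → β) :
    l.map g = (List.range l.length).map (fun i => g (l.getD i "")) := by
  apply List.ext_getElem
  · simp
  · intro i h1 h2
    have hi : i < l.length := by simpa using h1
    simp [List.getD_eq_getElem?_getD, List.getElem?_eq_getElem hi]

lemma drop_eq_map_range (l : List String) (m : Nat) :
    l.drop m = (List.range (l.length - m)).map (fun j => l.getD (m + j) "") := by
  apply List.ext_getElem
  · simp
  · intro i h1 h2
    have hi : m + i < l.length := by simp at h1; omega
    simp [List.getD_eq_getElem?_getD, List.getElem?_eq_getElem hi]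

lemma A_eq (l : List String) : distances_matrice l = MH l := by
  unfold distances_matrice MH rowH entH
  have hstep : (fun (matrix : List (List (Option Int))) (s : String) =>
      matrix ++ [(List.range l.length).foldl (fun r j => r ++ [distance_h s (l.getD j "")]) []])
    = (fun matrix s => matrix ++ [(List.range l.length).map (fun j => distance_h s (l.getD j ""))]) := by
    funext m s
    rw [PySem.List.foldl_append_singleton_eq_map (fun j => distance_h s (l.getD j "")) _ []]
    simp
  rw [hstep, PySem.List.foldl_append_singleton_eq_map
      (fun s => (List.range l.length).map (fun j => distance_h s (l.getD j ""))) l []]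
  rw [List.nil_append]
  exact map_eq_map_range l _

-- loop invariant of B: after the rows for indices < k are built, processing the
-- enumerated suffix from k completes the full matrix
lemma B_inv (l : List String) (suf : List String) :
    ∀ (k : Nat), suf = l.drop k → k ≤ l.length →
    (PySem.List.enumerate suf (k : Int)).foldl
      (fun rows p =>
        rows ++ [(rows.map (fun r => PySem.List.pyGetD r p.1 none)) ++ [some 0]
                 ++ ((PySem.List.slice l (some (p.1 + 1)) none).map (fun t => distance_h p.2 t))])
      ((List.range k).map (rowH l)) = MH l := by
  induction suf with
  | nil =>
    intro k hk hkle
    have hlen := congrArg List.length hk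
    simp only [List.length_nil, List.length_drop] at hlen
    have hkn : k = l.length := by omega
    simp [PySem.List.enumerate, MH, hkn]
  | cons x xs ih =>
    intro k hk hkle
    have hlen := congrArg List.length hk
    simp only [List.length_cons, List.length_drop] at hlen
    have hkn : k < l.length := by omega
    have hx : x = l.getD k "" := by
      have h1 : (l.drop k).head? = some x := by rw [← hk]; rfl
      rw [List.head?_drop] at h1
      simp [List.getD_eq_getElem?_getD, h1]
    have hxs : xs = l.drop (k + 1) := by
      have h1 : (l.drop k).tail = xs := by rw [← hk]; rfl
      rw [List.tail_drop] at h1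
      exact h1.symm
    rw [PySem.List.enumerate_cons, List.foldl_cons]
    have hcast : (k : Int) + 1 = ((k + 1 : Nat) : Int) := by push_cast; ring
    -- the freshly built row is exactly row k of the full matrix
    have hpart1 : ((List.range k).map (rowH l)).map (fun r => PySem.List.pyGetD r (k : Int) none)
        = (List.range k).map (entH l k) := by
      rw [List.map_map]
      apply List.map_congr_left
      intro j hj
      have hjk : j < k := List.mem_range.mp hj
      show PySem.List.pyGetD (rowH l j) (k : Int) none = entH l k j
      rw [PySem.List.pyGetD_natCast, rowH, PySem.List.getD_map_range _ _ _ _ hkn,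
        entH, entH, dh_comm]
    have hpart2 : (some (0 : Int)) = entH l k k := by
      rw [entH, dh_self]
    have hpart3 : (PySem.List.slice l (some ((k : Int) + 1)) none).map (fun t => distance_h x t)
        = (List.range (l.length - (k + 1))).map (fun j => entH l k ((k + 1) + j)) := by
      rw [hcast, PySem.List.slice_from_natCast, drop_eq_map_range, List.map_map]
      apply List.map_congr_left
      intro j _
      show distance_h x (l.getD (k + 1 + j) "") = entH l k (k + 1 + j)
      rw [hx, entH]
    have hrowk : rowH l k = (List.range k).map (entH l k) ++ [entH l k k]
        ++ (List.range (l.length - (k + 1))).map (fun j => entH l k ((k + 1) + j)) := by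
      rw [rowH]
      conv_lhs => rw [show l.length = (k + 1) + (l.length - (k + 1)) by omega]
      rw [List.range_add, List.range_succ, List.map_append, List.map_append, List.map_map]
      simp [Function.comp]
    have hacc : (List.range k).map (rowH l)
          ++ [((List.range k).map (rowH l)).map (fun r => PySem.List.pyGetD r (k : Int) none)
              ++ [some 0]
              ++ ((PySem.List.slice l (some ((k : Int) + 1)) none).map (fun t => distance_h x t))]
        = (List.range (k + 1)).map (rowH l) := by
      rw [hpart1, hpart3, List.range_succ, List.map_append]
      simp only [List.map_cons, List.map_nil]
      rw [hrowk, ← hpart2]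
    rw [hacc, hcast]
    exact ih (k + 1) hxs (by omega)

lemma B_eq (l : List String) : distances_matrice_alt l = MH l := by
  unfold distances_matrice_alt
  have h0 : (0 : Int) = ((0 : Nat) : Int) := rfl
  rw [h0]
  simpa using B_inv l l 0 (by simp) (by omega)

-- ===== VERDICT (by name: the statement is the Claim_ definition above) =====
theorem distances_matrice_spec : Claim_equal_distances_matrice := by
  intro l _
  unfold Spec_distances_matrice
  rw [A_eq, B_eq]
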